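-- pv_equiv track=rewrite | github.com/pypi-data/pypi-mirror-401 | packages/xython/xython-4.2.0.tar.gz/xython-4.2.0/src/xython/xy_util.py | regroup_l1d_by_index_list
-- ===== SOURCE A (Python) =====
-- def regroup_l1d_by_index_list(input_l1d, num_l1d):
-- 	"""
-- 	넘어온 자료를 원하는 숫자만큼씩 자르는것
-- 	입력값 : "ㅁㄴㅇㄹㄴㅇㄹㄴㅇㄹㄴㅇㄹㄴㄹ"
-- 	분리기준 = [2,4,5]
-- 	결과값 :["ㅁㄴ", "ㅇㄹㄴㅇ", "ㄹㄴㅇㄹㄴ", "ㅇㄹㄴㄹ"]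
--
-- 	:param input_l1d:
-- 	:param num_l1d:
-- 	:return:
-- 	"""
-- 	result = []
--
-- 	for one_text in input_l1d:
-- 		temp = []
-- 		text_len = len(one_text)
-- 		remain_text = one_text
-- 		for x in num_l1d:
-- 			if x <= len(remain_text):
-- 				temp.append(remain_text[0:x])
-- 				remain_text = remain_text[x:]
-- 			elif len(remain_text):
-- 				temp.append(remain_text)
-- 				break
-- 		result.append(temp)
-- 	return result
-- ===== SOURCE B (Python) =====
-- def regroup_l1d_by_index_list(input_l1d, num_l1d):
-- 	"""Precompute (start, end) boundary pairs as running prefix sums of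
-- 	num_l1d, then slice each text directly at those positions.
-- 	A zero-length pair (start == end) always yields an empty piece."""
-- 	bounds = []
-- 	pos = 0
-- 	for x in num_l1d:
-- 		bounds.append((pos, pos + x))
-- 		pos += x
-- 	result = []
-- 	for text in input_l1d:
-- 		n = len(text)
-- 		chunks = []
-- 		for start, end in bounds:
-- 			if end <= n or start == end:
-- 				chunks.append(text[start:end])
-- 			elif start < n:
-- 				chunks.append(text[start:])
-- 				break
-- 		result.append(chunks)
-- 	return result
-- ===== Notes on version B (the rewrite author's own statement) =====
-- stated objective: alternative
-- what changed: A repeatedly re-slices a shrinking remainder string; B precomputes (start,end) boundary pairs as prefix sums of num_l1d once and slices each original text directly at those positions. Pre_ restricts num_l1d to non-negative chunk lengths, the task's natural domain: for negative lengths A still returns values, but they are accidents of its remainder re-slicing (Python's negative-slice clamping), not chunk lengths a positional splitter accepts.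
-- outside the precondition, e.g. on regroup_l1d_by_index_list(['abcd'], [2, -1]): A returns [['ab', 'c']], B returns [['ab', '']]
import Mathlib
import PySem

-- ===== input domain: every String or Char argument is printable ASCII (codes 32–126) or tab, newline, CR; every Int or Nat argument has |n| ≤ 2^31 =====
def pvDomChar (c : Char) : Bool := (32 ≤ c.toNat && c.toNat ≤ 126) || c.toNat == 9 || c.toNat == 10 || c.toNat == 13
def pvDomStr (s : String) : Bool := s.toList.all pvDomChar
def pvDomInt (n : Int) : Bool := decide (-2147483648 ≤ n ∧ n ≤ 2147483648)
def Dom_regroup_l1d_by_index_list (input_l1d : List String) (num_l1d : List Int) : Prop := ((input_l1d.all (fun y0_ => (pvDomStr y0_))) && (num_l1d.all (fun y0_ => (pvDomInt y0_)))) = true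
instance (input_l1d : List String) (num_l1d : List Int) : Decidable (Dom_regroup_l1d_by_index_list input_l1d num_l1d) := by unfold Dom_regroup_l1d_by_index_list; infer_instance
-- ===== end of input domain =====

-- B precomputes (start, end) boundary pairs (prefix sums of num_l1d) once and slices each
-- original text at those positions, instead of A's repeated re-slicing of a shrinking remainder.

-- ===== PORT A =====
-- inner 'for x in num_l1d' loop of A: state = (remain_text, temp); break returns temp early
def pvAInner (num_l1d : List Int) (remain : String) (temp : List String) : List String :=
  match num_l1d with
  | [] => temp
  | x :: rest =>
    if x ≤ PySem.Str.len remain then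
      pvAInner rest (PySem.Str.slice remain (some x) none)
        (temp ++ [PySem.Str.slice remain (some 0) (some x)])
    else if PySem.Str.len remain ≠ 0 then
      temp ++ [remain]
    else
      pvAInner rest remain temp

def regroup_l1d_by_index_list (input_l1d : List String) (num_l1d : List Int) : List (List String) :=
  input_l1d.foldl (fun result one_text => result ++ [pvAInner num_l1d one_text []]) []

-- ===== PORT B =====
-- first loop of B: prefix-sum boundary pairs
def pvBBounds (num_l1d : List Int) (pos : Int) (bounds : List (Int × Int)) : List (Int × Int) :=
  match num_l1d with
  | [] => bounds
  | x :: rest => pvBBounds rest (pos + x) (bounds ++ [(pos, pos + x)])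

-- inner 'for start, end in bounds' loop of B; break returns chunks early
def pvBChunks (bounds : List (Int × Int)) (t : String) (n : Int) (chunks : List String) : List String :=
  match bounds with
  | [] => chunks
  | p :: rest =>
    if p.2 ≤ n ∨ p.1 = p.2 then
      pvBChunks rest t n (chunks ++ [PySem.Str.slice t (some p.1) (some p.2)])
    else if p.1 < n then
      chunks ++ [PySem.Str.slice t (some p.1) none]
    else
      pvBChunks rest t n chunks

def regroup_l1d_by_index_list_alt (input_l1d : List String) (num_l1d : List Int) : List (List String) :=
  let bounds := pvBBounds num_l1d 0 []
  input_l1d.foldl (fun result text =>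
    result ++ [pvBChunks bounds text (PySem.Str.len text) []]) []

-- ===== PRECONDITION & SPEC =====
-- Pre_ excludes only inputs that pair a nonempty text list with a negative chunk length:
-- the task's natural domain is non-negative lengths, and for negative ones A still returns
-- values, but they are accidents of its remainder re-slicing (Python's negative-slice
-- clamping), not chunk lengths a positional splitter should accept.
def Pre_regroup_l1d_by_index_list (input_l1d : List String) (num_l1d : List Int) : Prop :=
  (∀ x ∈ num_l1d, 0 ≤ x) ∨ input_l1d = []
instance (input_l1d : List String) (num_l1d : List Int) : Decidable (Pre_regroup_l1d_by_index_list input_l1d num_l1d) := by unfold Pre_regroup_l1d_by_index_list; infer_instance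

def pvWitness_regroup_l1d_by_index_list : List String × List Int := (["hello world", "ab"], [2, 4, 5])

def Spec_regroup_l1d_by_index_list (input_l1d : List String) (num_l1d : List Int) (out : List (List String)) : Prop := out = regroup_l1d_by_index_list_alt input_l1d num_l1d
instance (input_l1d : List String) (num_l1d : List Int) (out : List (List String)) : Decidable (Spec_regroup_l1d_by_index_list input_l1d num_l1d out) := by unfold Spec_regroup_l1d_by_index_list; infer_instance

-- ===== CLAIM (what is proved, stated in full; the proofs are below) =====
def Claim_equal_regroup_l1d_by_index_list : Prop := ∀ (input_l1d : List String) (num_l1d : List Int), Dom_regroup_l1d_by_index_list input_l1d num_l1d → Pre_regroup_l1d_by_index_list input_l1d num_l1d → Spec_regroup_l1d_by_index_list input_l1d num_l1d (regroup_l1d_by_index_list input_l1d num_l1d)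

-- ===== LEMMAS AND PROOFS =====

theorem pvBBounds_acc (xs : List Int) : ∀ (pos : Int) (acc : List (Int × Int)),
    pvBBounds xs pos acc = acc ++ pvBBounds xs pos [] := by
  induction xs with
  | nil => intro pos acc; simp [pvBBounds]
  | cons x rest ih =>
    intro pos acc
    rw [pvBBounds, pvBBounds, ih (pos + x) (acc ++ [(pos, pos + x)]),
        ih (pos + x) ([] ++ [(pos, pos + x)])]
    simp

-- after the text is exhausted (n ≤ pos, remain empty), A consumes zeros (an empty chunk) and
-- skips every positive x; B appends the empty piece for start = end pairs and skips the rest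
theorem pv_exhausted (t : String) (xs : List Int) (hxs : ∀ x ∈ xs, 0 ≤ x) :
    ∀ (pos : Int) (remain : String) (temp : List String),
      (t.toList.length : Int) ≤ pos → remain.toList = [] →
      pvAInner xs remain temp
        = pvBChunks (pvBBounds xs pos []) t (PySem.Str.len t) temp := by
  induction xs with
  | nil => intro pos remain temp _ _; simp [pvAInner, pvBBounds, pvBChunks]
  | cons x rest ih =>
    intro pos remain temp hpos hr
    have hx : 0 ≤ x := hxs x (by simp)
    have hlenr : PySem.Str.len remain = 0 := by rw [PySem.Str.len_eq, hr]; rfl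
    have hlent : PySem.Str.len t = (t.toList.length : Int) := PySem.Str.len_eq t
    rw [pvAInner, pvBBounds, pvBBounds_acc, List.nil_append]
    simp only [List.singleton_append, pvBChunks]
    rw [hlenr, hlent]
    by_cases hz : x = 0
    · -- a zero entry: both append the empty piece
      subst hz
      rw [if_pos le_rfl, if_pos (Or.inr (add_zero pos).symm)]
      have hchunk : PySem.Str.slice remain (some 0) (some 0)
          = PySem.Str.slice t (some pos) (some (pos + 0)) := by
        apply String.toList_inj.mp
        rw [PySem.Str.toList_slice, PySem.Str.toList_slice,
            PySem.Chars.slice_eq_listSlice, PySem.Chars.slice_eq_listSlice,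
            hr, add_zero]
        simp [PySem.List.slice]
      have hrem : (PySem.Str.slice remain (some 0) none).toList = [] := by
        rw [PySem.Str.toList_slice, PySem.Chars.slice_eq_listSlice,
            PySem.List.slice_zero_start, PySem.List.slice_none_none, hr]
      rw [hchunk]
      exact ih (fun y hy => hxs y (by simp [hy])) (pos + 0) _ _ (by omega) hrem
    · -- a positive entry past the end: both skip it
      rw [if_neg (show ¬(x ≤ (0 : Int)) by omega),
          if_neg (show ¬((pos + x ≤ (t.toList.length : Int)) ∨ (pos = pos + x)) by omega),
          if_neg (show ¬((0 : Int) ≠ 0) by omega),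
          if_neg (show ¬(pos < (t.toList.length : Int)) by omega)]
      exact ih (fun y hy => hxs y (by simp [hy])) (pos + x) remain temp (by omega) hr

-- main invariant: A's remainder loop at position pos = B's pair loop on the remaining bounds
theorem pv_inner (t : String) (xs : List Int) (hxs : ∀ x ∈ xs, 0 ≤ x) :
    ∀ (pos : Nat) (remain : String) (temp : List String),
      pos ≤ t.toList.length →
      remain.toList = t.toList.drop pos →
      pvAInner xs remain temp
        = pvBChunks (pvBBounds xs (pos : Int) []) t (PySem.Str.len t) temp := by
  induction xs with
  | nil => intro pos remain temp _ _; simp [pvAInner, pvBBounds, pvBChunks]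
  | cons x rest ih =>
    intro pos remain temp hpos hr
    have hx : 0 ≤ x := hxs x (by simp)
    have hlenr : PySem.Str.len remain = (t.toList.length : Int) - pos := by
      rw [PySem.Str.len_eq, hr, List.length_drop]; omega
    have hlent : PySem.Str.len t = (t.toList.length : Int) := PySem.Str.len_eq t
    rw [pvAInner, pvBBounds, pvBBounds_acc, List.nil_append]
    simp only [List.singleton_append, pvBChunks]
    rw [hlenr, hlent]
    by_cases hle : (pos : Int) + x ≤ (t.toList.length : Int)
    · -- chunk fits: both append t[pos:pos+x] and continue
      rw [if_pos (by omega), if_pos (Or.inl hle)]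
      have hchunk : PySem.Str.slice remain (some 0) (some x)
          = PySem.Str.slice t (some (pos : Int)) (some ((pos : Int) + x)) := by
        apply String.toList_inj.mp
        rw [PySem.Str.toList_slice, PySem.Str.toList_slice,
            PySem.Chars.slice_eq_listSlice, PySem.Chars.slice_eq_listSlice, hr]
        have hxc : x = ((x.toNat : Nat) : Int) := by omega
        rw [hxc]
        rw [PySem.List.slice_zero_start, PySem.List.slice_to_natCast,
            show ((pos : Nat) : Int) + ((x.toNat : Nat) : Int) = (((pos + x.toNat : Nat)) : Int) by push_cast; ring,
            PySem.List.slice_natCast]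
        congr 1
        omega
      have hrem : (PySem.Str.slice remain (some x) none).toList
          = t.toList.drop (pos + x.toNat) := by
        rw [PySem.Str.toList_slice, PySem.Chars.slice_eq_listSlice, hr,
            show x = ((x.toNat : Nat) : Int) by omega,
            PySem.List.slice_from_natCast, List.drop_drop]
        simp
        omega
      have hcast : (pos : Int) + x = (((pos + x.toNat : Nat)) : Int) := by omega
      rw [hchunk, hcast]
      exact ih (fun y hy => hxs y (by simp [hy])) (pos + x.toNat)
        (PySem.Str.slice remain (some x) none) _ (by omega) hrem
    · -- chunk overflows
      rw [if_neg (show ¬(x ≤ (t.toList.length : Int) - (pos : Int)) by omega),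
          if_neg (show ¬(((pos : Int) + x ≤ (t.toList.length : Int)) ∨ ((pos : Int) = (pos : Int) + x)) by omega)]
      by_cases hlt : pos < t.toList.length
      · -- remainder nonempty: both append the tail and stop
        rw [if_pos (show (t.toList.length : Int) - (pos : Int) ≠ 0 by omega),
            if_pos (show ((pos : Int) < (t.toList.length : Int)) by exact_mod_cast hlt)]
        have : remain = PySem.Str.slice t (some (pos : Int)) none := by
          apply String.toList_inj.mp
          rw [PySem.Str.toList_slice, PySem.Chars.slice_eq_listSlice,
              PySem.List.slice_from_natCast, hr]
        rw [this]
      · -- remainder empty (pos = length): both skip everything from here on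
        rw [if_neg (show ¬((t.toList.length : Int) - (pos : Int) ≠ 0) by omega),
            if_neg (show ¬((pos : Int) < (t.toList.length : Int)) by omega)]
        have hpn : pos = t.toList.length := by omega
        rw [pv_exhausted t rest (fun y hy => hxs y (by simp [hy])) ((pos : Int) + x) remain temp
              (by omega) (by rw [hr, hpn]; simp), hlent]

-- ===== VERDICT (by name: the statement is the Claim_ definition above) =====
theorem regroup_l1d_by_index_list_spec : Claim_equal_regroup_l1d_by_index_list := by
  intro input_l1d num_l1d _ hpre
  unfold Spec_regroup_l1d_by_index_list regroup_l1d_by_index_list regroup_l1d_by_index_list_alt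
  rcases hpre with hpre | hempty
  · rw [PySem.List.foldl_append_singleton_eq_map, PySem.List.foldl_append_singleton_eq_map]
    simp only [List.nil_append]
    apply List.map_congr_left
    intro t _
    have := pv_inner t num_l1d hpre 0 t [] (by omega) (by simp)
    simpa using this
  · subst hempty; rfl
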